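-- pv_equiv track=rewrite | github.com/franklinbaldo/egregora | .team/repo/scheduler/schedule.py | get_next_sequence
-- ===== SOURCE A (Python) =====
-- from typing import Any
--
-- def get_next_sequence(rows: list[dict[str, Any]], current: dict[str, Any]) -> dict[str, Any] | None:
--     """Get the next sequence after the current one."""
--     found_current = False
--     for row in rows:
--         if found_current:
--             return row
--         if row["sequence"] == current["sequence"]:
--             found_current = True
--     return None
-- ===== SOURCE B (Python) =====
-- def get_next_sequence(rows, current):
--     """Get the next sequence after the current one."""
--     if not rows:
--         return None
--     head, *rest = rows
--     if head["sequence"] == current["sequence"]: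
--         return rest[0] if rest else None
--     return get_next_sequence(rest, current)
-- ===== Notes on version B (the rewrite author's own statement) =====
-- stated objective: alternative
-- what changed: Replaces the iterative boolean-flag loop with direct structural recursion on the list: the head row is compared and its successor returned immediately, otherwise the function recurses on the tail, so no flag state is carried.
import Mathlib
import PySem

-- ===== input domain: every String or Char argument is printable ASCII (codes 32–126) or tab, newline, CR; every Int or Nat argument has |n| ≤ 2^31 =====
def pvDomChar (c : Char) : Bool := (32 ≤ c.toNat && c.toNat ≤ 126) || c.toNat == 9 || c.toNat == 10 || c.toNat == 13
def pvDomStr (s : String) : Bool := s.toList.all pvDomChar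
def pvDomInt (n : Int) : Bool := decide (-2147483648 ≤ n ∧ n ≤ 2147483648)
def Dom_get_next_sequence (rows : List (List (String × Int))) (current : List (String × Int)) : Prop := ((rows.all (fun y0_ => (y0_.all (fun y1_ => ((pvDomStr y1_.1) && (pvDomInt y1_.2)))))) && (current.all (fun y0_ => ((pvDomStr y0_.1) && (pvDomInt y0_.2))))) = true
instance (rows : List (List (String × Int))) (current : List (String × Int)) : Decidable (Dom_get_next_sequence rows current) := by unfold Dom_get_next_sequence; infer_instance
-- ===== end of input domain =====

-- B replaces A's iterative boolean-flag loop by direct structural recursion on the list (no flag state); objective: alternative decomposition, same cost.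

-- first-match lookup of the "sequence" key in an association-list dict (Python d["sequence"]; none = KeyError)
def pvSeq : List (String × Int) → Option Int
  | [] => none
  | (k, v) :: rest => if k = "sequence" then some v else pvSeq rest

-- ===== PORT A =====
-- A's loop: carries the found_current flag through the rows.
def pvGoA (c : Option Int) : List (List (String × Int)) → Bool → Option (List (String × Int))
  | [], _ => none
  | row :: rest, found =>
      if found then some row
      else if pvSeq row = c then pvGoA c rest true else pvGoA c rest false

def get_next_sequence (rows : List (List (String × Int))) (current : List (String × Int)) : Option (List (String × Int)) :=
  pvGoA (pvSeq current) rows false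

-- ===== PORT B =====
-- B's recursion: empty → None; head matches → rest[0] if rest else None; otherwise recurse on rest.
def get_next_sequence_alt (rows : List (List (String × Int))) (current : List (String × Int)) : Option (List (String × Int)) :=
  match rows with
  | [] => none
  | head :: rest =>
      if pvSeq head = pvSeq current then
        match rest with
        | [] => none
        | r :: _ => some r
      else get_next_sequence_alt rest current

-- ===== PRECONDITION & SPEC =====
-- first-match value of the "sequence" key, as the dict semantics reads it (none = key absent)
def pvSeqVal (r : List (String × Int)) : Option Int := (r.find? (fun p => p.1 == "sequence")).map Prod.snd

-- Pre_ excludes exactly the inputs where Python A raises KeyError: rows nonempty with current lacking the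
-- "sequence" key, or a row lacking it that the scan reaches (no earlier row matched current's value).
def Pre_get_next_sequence (rows : List (List (String × Int))) (current : List (String × Int)) : Prop :=
  rows = [] ∨ ("sequence" ∈ current.map Prod.fst ∧
    ∀ i < rows.length, (∀ j < i, pvSeqVal (rows.getD j []) ≠ pvSeqVal current) →
      "sequence" ∈ (rows.getD i []).map Prod.fst)
instance (rows : List (List (String × Int))) (current : List (String × Int)) : Decidable (Pre_get_next_sequence rows current) := by unfold Pre_get_next_sequence; infer_instance

def pvWitness_get_next_sequence : (List (List (String × Int))) × (List (String × Int)) :=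
  ([[("sequence", 1)], [("sequence", 2)]], [("sequence", 1)])

def Spec_get_next_sequence (rows : List (List (String × Int))) (current : List (String × Int)) (out : Option (List (String × Int))) : Prop := out = get_next_sequence_alt rows current
instance (rows : List (List (String × Int))) (current : List (String × Int)) (out : Option (List (String × Int))) : Decidable (Spec_get_next_sequence rows current out) := by unfold Spec_get_next_sequence; infer_instance

-- ===== CLAIM (what is proved, stated in full; the proofs are below) =====
def Claim_equal_get_next_sequence : Prop := ∀ (rows : List (List (String × Int))) (current : List (String × Int)), Dom_get_next_sequence rows current → Pre_get_next_sequence rows current → Spec_get_next_sequence rows current (get_next_sequence rows current)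

-- ===== LEMMAS AND PROOFS =====
-- The two programs agree on every input (not only inside Pre_).
theorem pvGoA_eq_alt (current : List (String × Int)) (rows : List (List (String × Int))) :
    pvGoA (pvSeq current) rows false = get_next_sequence_alt rows current := by
  induction rows with
  | nil => rfl
  | cons r rs ih =>
      by_cases h : pvSeq r = pvSeq current
      · cases rs <;> simp [pvGoA, get_next_sequence_alt, h]
      · simp [pvGoA, get_next_sequence_alt, h, ih]

-- ===== VERDICT (by name: the statement is the Claim_ definition above) =====
theorem get_next_sequence_spec : Claim_equal_get_next_sequence := by
  intro rows current _ _
  unfold Spec_get_next_sequence get_next_sequence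
  exact pvGoA_eq_alt _ _
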